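-- pv_equiv track=rewrite | github.com/IguanaAzul/RubiksCube | rubiks_cube/rubiks_cube.py | swap4
-- ===== SOURCE A (Python) =====
-- def swap4(a, b, c, d, way):
--     """
--     Swaps Four Values.
--     :param a: Value 1.
--     :param b: Value 2.
--     :param c: Value 3.
--     :param d: Value 4.
--     :param way: 0 to clockwise swap, 1 to counterclockwise swap, 2 to double swap.
--     :return: swapped values.
--     """
--     if way:
--         aux = d
--         d = c
--         c = b
--         b = a
--         a = aux
--         if way == 2:
--             a, b, c, d = swap4(a, b, c, d, 1)
--     else:
--         aux = a
--         a = b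
--         b = c
--         c = d
--         d = aux
--     return a, b, c, d
-- ===== SOURCE B (Python) =====
-- def swap4(a, b, c, d, way):
--     """Rotate the four values as one slice-rotation: simpler than chained swaps + recursion."""
--     shift = 1 if not way else (2 if way == 2 else 3)
--     vals = (a, b, c, d)
--     return vals[shift:] + vals[:shift]
-- ===== Notes on version B (the rewrite author's own statement) =====
-- stated objective: simpler
-- what changed: Replaces the per-branch chained element swaps and the recursive double-swap with computing a single rotation amount and returning one slice-rotation of the 4-tuple.
import Mathlib
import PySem

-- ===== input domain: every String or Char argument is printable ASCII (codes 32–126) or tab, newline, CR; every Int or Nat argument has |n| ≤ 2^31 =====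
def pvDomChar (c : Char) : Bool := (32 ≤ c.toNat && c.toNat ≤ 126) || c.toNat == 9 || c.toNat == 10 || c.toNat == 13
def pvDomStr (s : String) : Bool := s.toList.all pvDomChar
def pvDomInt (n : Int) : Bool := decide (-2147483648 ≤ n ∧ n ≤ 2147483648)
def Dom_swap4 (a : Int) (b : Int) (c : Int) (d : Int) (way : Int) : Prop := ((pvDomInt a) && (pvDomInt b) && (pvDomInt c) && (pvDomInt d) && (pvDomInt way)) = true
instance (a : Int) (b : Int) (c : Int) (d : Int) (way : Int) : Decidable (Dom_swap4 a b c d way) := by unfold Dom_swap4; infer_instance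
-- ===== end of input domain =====

-- B replaces A's per-branch chained swaps and recursive double-swap with one computed-shift slice-rotation of the 4-tuple (simpler decomposition, same cost).


-- ===== PORT A =====
-- A: recursion on `way` wouldn't terminate structurally in general, but A only recurses
-- once with way = 1, so the literal transliteration uses a helper for the way≠0 branch.
def swap4Spin (a : Int) (b : Int) (c : Int) (d : Int) : Int × Int × Int × Int :=
  -- aux = d; d = c; c = b; b = a; a = aux
  let aux := d
  let d := c
  let c := b
  let b := a
  let a := aux
  (a, b, c, d)

def swap4 (a : Int) (b : Int) (c : Int) (d : Int) (way : Int) : Int × Int × Int × Int :=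
  if way ≠ 0 then
    let (a, b, c, d) := swap4Spin a b c d
    if way = 2 then
      -- a, b, c, d = swap4(a, b, c, d, 1): the recursive call takes the way≠0, way≠2 path
      swap4Spin a b c d
    else (a, b, c, d)
  else
    -- aux = a; a = b; b = c; c = d; d = aux
    let aux := a
    let a := b
    let b := c
    let c := d
    let d := aux
    (a, b, c, d)

-- ===== PORT B =====
def swap4_alt (a : Int) (b : Int) (c : Int) (d : Int) (way : Int) : Int × Int × Int × Int :=
  let shift : Int := if way = 0 then 1 else if way = 2 then 2 else 3
  let vals : List Int := [a, b, c, d]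
  let r := PySem.List.slice vals (some shift) (some 4) ++ PySem.List.slice vals (some 0) (some shift)
  (r.getD 0 0, r.getD 1 0, r.getD 2 0, r.getD 3 0)

-- ===== PRECONDITION & SPEC =====
def Spec_swap4 (a : Int) (b : Int) (c : Int) (d : Int) (way : Int) (out : Int × Int × Int × Int) : Prop := out = swap4_alt a b c d way
instance (a : Int) (b : Int) (c : Int) (d : Int) (way : Int) (out : Int × Int × Int × Int) : Decidable (Spec_swap4 a b c d way out) := by unfold Spec_swap4; infer_instance

-- ===== CLAIM (what is proved, stated in full; the proofs are below) =====
def Claim_equal_swap4 : Prop := ∀ (a : Int) (b : Int) (c : Int) (d : Int) (way : Int), Dom_swap4 a b c d way → Spec_swap4 a b c d way (swap4 a b c d way)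

-- ===== LEMMAS AND PROOFS =====

-- ===== VERDICT (by name: the statement is the Claim_ definition above) =====
theorem swap4_spec : Claim_equal_swap4 := by
  intro a b c d way _
  unfold Spec_swap4 swap4 swap4_alt swap4Spin
  by_cases h0 : way = 0
  · simp [h0, PySem.List.slice]
  · by_cases h2 : way = 2 <;> simp [h0, h2, PySem.List.slice]
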